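-- pv_equiv track=rewrite | github.com/moxx799/VisQ-Search-Engine | examples/QC/QC_functions.py | get_set_intersection
-- ===== SOURCE A (Python) =====
-- def get_set_intersection(cent_list):
--     similar_centroid_list = []
--     for i in range(len(cent_list) - 1 ):
--         a = cent_list[i]
--         b = cent_list[i+1]
--         intersectionAB = [ele1 for ele1 in a for ele2 in b if ele1 == ele2]
--         # intersectionAB = list(set(a).intersection(set(b)))
--         similar_centroid_list += intersectionAB
--     return similar_centroid_list
-- ===== SOURCE B (Python) =====
-- def get_set_intersection(cent_list):
--     # Sort each right-hand list once, then count each left element's occurrences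
--     # by binary search (bisect_right - bisect_left) on the sorted list.
--     def bisect(s, x, right):
--         lo, hi = 0, len(s)
--         while lo < hi:
--             mid = (lo + hi) // 2
--             if s[mid] < x or (right and s[mid] == x):
--                 lo = mid + 1
--             else:
--                 hi = mid
--         return lo
--     out = []
--     for a, b in zip(cent_list, cent_list[1:]):
--         s = sorted(b)
--         for x in a:
--             out += [x] * (bisect(s, x, True) - bisect(s, x, False))
--     return out
-- ===== Notes on version B (the rewrite author's own statement) =====
-- stated objective: alternative
-- what changed: Replaces A's per-pair nested comparison comprehension by sort-then-binary-search: each right-hand list is sorted once and every left element's multiplicity is found as bisect_right minus bisect_left with a hand-written binary search, pairs coming from zip instead of index arithmetic.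
import Mathlib
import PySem

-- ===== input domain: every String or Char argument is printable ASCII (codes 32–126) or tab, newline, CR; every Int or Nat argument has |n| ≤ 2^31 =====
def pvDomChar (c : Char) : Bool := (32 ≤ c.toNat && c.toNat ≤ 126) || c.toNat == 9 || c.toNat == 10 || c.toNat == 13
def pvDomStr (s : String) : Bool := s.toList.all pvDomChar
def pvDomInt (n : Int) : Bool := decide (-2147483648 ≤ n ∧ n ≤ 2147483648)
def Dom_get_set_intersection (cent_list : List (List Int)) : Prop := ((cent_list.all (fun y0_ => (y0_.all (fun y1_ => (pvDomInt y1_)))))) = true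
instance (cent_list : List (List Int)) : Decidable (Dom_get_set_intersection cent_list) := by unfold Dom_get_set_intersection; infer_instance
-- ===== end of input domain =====

-- B replaces A's per-pair nested comparison scan by sorting the right-hand list once and
-- counting each left element via a hand-written binary search (bisect_right - bisect_left):
-- a structurally different algorithm (objective: alternative; no speed claimed).

-- ===== PORT A =====
def get_set_intersection (cent_list : List (List Int)) : List Int :=
  (PySem.List.pyRange 0 ((cent_list.length : Int) - 1) 1).foldl (fun acc i =>
    let a := PySem.List.pyGetD cent_list i []
    let b := PySem.List.pyGetD cent_list (i + 1) []
    let intersectionAB := a.flatMap (fun e1 => b.filterMap (fun e2 => if e1 == e2 then some e1 else none))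
    acc ++ intersectionAB) []

-- ===== PORT B =====
-- Source B's inner `bisect(s, x, right)` while-loop (indices are nonnegative ints, kept as Nat;
-- s[mid] is in range whenever the loop runs, ported as getD mid 0)
def pvBisect (s : List Int) (x : Int) (right : Bool) (lo hi : Nat) : Nat :=
  if lo < hi then
    let mid := (lo + hi) / 2
    if s.getD mid 0 < x || (right && s.getD mid 0 == x) then
      pvBisect s x right (mid + 1) hi
    else
      pvBisect s x right lo mid
  else lo
termination_by hi - lo
decreasing_by all_goals omega

def get_set_intersection_alt (cent_list : List (List Int)) : List Int :=
  (cent_list.zip cent_list.tail).foldl (fun out p =>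
    let s := PySem.List.sorted p.2 (fun x => x) false
    out ++ p.1.flatMap (fun x =>
      List.replicate (pvBisect s x true 0 s.length - pvBisect s x false 0 s.length) x)) []

-- ===== PRECONDITION & SPEC =====
def Spec_get_set_intersection (cent_list : List (List Int)) (out : List Int) : Prop := out = get_set_intersection_alt cent_list
instance (cent_list : List (List Int)) (out : List Int) : Decidable (Spec_get_set_intersection cent_list out) := by unfold Spec_get_set_intersection; infer_instance

-- ===== CLAIM (what is proved, stated in full; the proofs are below) =====
def Claim_equal_get_set_intersection : Prop := ∀ (cent_list : List (List Int)), Dom_get_set_intersection cent_list → Spec_get_set_intersection cent_list (get_set_intersection cent_list)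

-- ===== LEMMAS AND PROOFS =====

-- the predicate pvBisect searches the boundary of: y < x (left) resp. y ≤ x (right)
def pvP (x : Int) (right : Bool) (y : Int) : Bool := y < x || (right && y == x)

lemma pvP_downward (x : Int) (right : Bool) {y z : Int} (h : y ≤ z) (hz : pvP x right z = true) :
    pvP x right y = true := by
  cases right <;> simp [pvP] at hz ⊢ <;> omega

-- the loop returns a boundary index: p holds on every index below it, fails on every index at/above it
lemma pvBisect_boundary (s : List Int) (x : Int) (right : Bool)
    (hs : s.Pairwise (· ≤ ·)) :
    ∀ lo hi, lo ≤ hi → hi ≤ s.length →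
      (∀ j, j < lo → pvP x right (s.getD j 0) = true) →
      (∀ j, hi ≤ j → j < s.length → pvP x right (s.getD j 0) = false) →
      pvBisect s x right lo hi ≤ s.length ∧
      (∀ j, j < pvBisect s x right lo hi → pvP x right (s.getD j 0) = true) ∧
      (∀ j, pvBisect s x right lo hi ≤ j → j < s.length → pvP x right (s.getD j 0) = false) := by
  have mono : ∀ j k, j ≤ k → k < s.length → s.getD j 0 ≤ s.getD k 0 := by
    intro j k hjk hk
    rcases eq_or_lt_of_le hjk with rfl | hlt
    · exact le_refl _
    · have hj : j < s.length := lt_trans hlt hk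
      rw [List.getD_eq_getElem s 0 hj, List.getD_eq_getElem s 0 hk]
      exact List.pairwise_iff_getElem.mp hs j k hj hk hlt
  intro lo hi
  induction lo, hi using pvBisect.induct s x right with
  | case1 lo hi hlt mid cond ih =>
      intro _ hhi hlo hhi'
      rw [pvBisect, if_pos hlt]
      simp only [mid] at *
      rw [if_pos cond]
      refine ih (by omega) hhi ?_ hhi'
      intro j hj
      by_cases hjlo : j < lo
      · exact hlo j hjlo
      · have hmid : (lo + hi) / 2 < s.length := by omega
        exact pvP_downward x right (mono j ((lo + hi) / 2) (by omega) hmid) cond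
  | case2 lo hi hlt mid cond ih =>
      intro _ hhi hlo hhi'
      rw [pvBisect, if_pos hlt]
      simp only [mid] at *
      rw [if_neg cond]
      refine ih (by omega) (by omega) hlo ?_
      intro j hj hjlen
      by_cases hjhi : hi ≤ j
      · exact hhi' j hjhi hjlen
      · cases h : pvP x right (s.getD j 0) with
        | false => rfl
        | true =>
            exact absurd (pvP_downward x right (mono ((lo + hi) / 2) j hj hjlen) h)
              (by simpa [pvP] using cond)
  | case3 lo hi hge =>
      intro hle hhi hlo hhi'
      rw [pvBisect, if_neg hge]
      exact ⟨by omega, hlo, fun j hj hjlen => hhi' j (by omega) hjlen⟩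

-- a boundary index of p in a list equals countP p
lemma countP_eq_boundary (s : List Int) (p : Int → Bool) (r : Nat) (hr : r ≤ s.length)
    (h1 : ∀ j, j < r → p (s.getD j 0) = true)
    (h2 : ∀ j, r ≤ j → j < s.length → p (s.getD j 0) = false) :
    s.countP p = r := by
  have : s = s.take r ++ s.drop r := (List.take_append_drop r s).symm
  rw [this, List.countP_append]
  have htake : (s.take r).countP p = r := by
    rw [List.countP_eq_length.mpr, List.length_take_of_le hr]
    intro a ha
    obtain ⟨j, hj, hja⟩ := List.mem_iff_getElem.mp ha
    have hjr : j < r := by rw [List.length_take] at hj; omega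
    have hjl : j < s.length := lt_of_lt_of_le hjr hr
    have : a = s.getD j 0 := by
      rw [List.getD_eq_getElem s 0 hjl, ← hja, List.getElem_take]
    rw [this]; exact h1 j hjr
  have hdrop : (s.drop r).countP p = 0 := by
    rw [List.countP_eq_zero]
    intro a ha
    obtain ⟨j, hj, hja⟩ := List.mem_iff_getElem.mp ha
    have hjl : r + j < s.length := by
      have := hj; rw [List.length_drop] at this; omega
    have : a = s.getD (r + j) 0 := by
      rw [List.getD_eq_getElem s 0 hjl, ← hja, List.getElem_drop]
    rw [this]
    simp only [h2 (r + j) (by omega) hjl]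
    simp
  omega

-- bisect_right minus bisect_left counts x: countP (≤ x) - countP (< x) = count x
lemma countP_right_sub_left (s : List Int) (x : Int) :
    s.countP (pvP x true) - s.countP (pvP x false) = s.count x := by
  induction s with
  | nil => simp
  | cons y t ih =>
      have hle : t.countP (pvP x false) ≤ t.countP (pvP x true) := by
        apply List.countP_mono_left
        intro a _ h
        simp [pvP] at h ⊢
        omega
      rw [List.countP_cons, List.countP_cons, List.count_cons]
      rcases lt_trichotomy y x with h | h | h
      · simp [pvP, h, ne_of_lt h]; omega
      · subst h; simp [pvP]; omega
      · simp [pvP, not_lt.mpr (le_of_lt h), (ne_of_gt h)]; omega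

-- pvBisect on the whole sorted list computes countP
lemma pvBisect_eq_countP (s : List Int) (x : Int) (right : Bool) (hs : s.Pairwise (· ≤ ·)) :
    pvBisect s x right 0 s.length = s.countP (pvP x right) := by
  obtain ⟨hle, h1, h2⟩ := pvBisect_boundary s x right hs 0 s.length (Nat.zero_le _) (le_refl _)
    (fun j hj => absurd hj (Nat.not_lt_zero j)) (fun j hj hjl => absurd hjl (by omega))
  exact (countP_eq_boundary s _ _ hle h1 h2).symm

-- B's per-element emission is replicate-by-count in b
lemma pvBisect_count (b : List Int) (x : Int) :
    pvBisect (PySem.List.sorted b (fun x => x) false) x true 0 (PySem.List.sorted b (fun x => x) false).length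
      - pvBisect (PySem.List.sorted b (fun x => x) false) x false 0 (PySem.List.sorted b (fun x => x) false).length
      = b.count x := by
  have hs : (PySem.List.sorted b (fun x => x) false).Pairwise (· ≤ ·) := by
    simpa using PySem.List.sorted_pairwise b (fun x => x)
  simp only [pvBisect_eq_countP _ x true hs, pvBisect_eq_countP _ x false hs]
  rw [countP_right_sub_left]
  exact List.Perm.count_eq (PySem.List.sorted_perm b (fun x => x) false) x

-- A's inner comprehension for a fixed left element is replicate-by-count
lemma filterMap_eq_replicate_count (x : Int) (b : List Int) :
    b.filterMap (fun e2 => if x == e2 then some x else none) = List.replicate (b.count x) x := by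
  induction b with
  | nil => simp
  | cons e bs ih =>
      rw [List.filterMap_cons, ih]
      by_cases h : x = e
      · subst h
        simp [List.replicate_succ]
      · simp [h, Ne.symm h]

-- per-pair: A's comprehension = B's bisect-based emission
lemma pair_eq (a b : List Int) :
    a.flatMap (fun e1 => b.filterMap (fun e2 => if e1 == e2 then some e1 else none))
      = a.flatMap (fun x =>
          let s := PySem.List.sorted b (fun x => x) false
          List.replicate (pvBisect s x true 0 s.length - pvBisect s x false 0 s.length) x) := by
  apply List.flatMap_congr
  intro x _
  show _ = List.replicate
      (pvBisect (PySem.List.sorted b (fun x => x) false) x true 0 (PySem.List.sorted b (fun x => x) false).length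
        - pvBisect (PySem.List.sorted b (fun x => x) false) x false 0 (PySem.List.sorted b (fun x => x) false).length) x
  rw [pvBisect_count b x]
  exact filterMap_eq_replicate_count x b

-- the pairs A indexes are exactly zip cl (tail cl)
lemma index_pairs (cl : List (List Int)) :
    (List.range (((cl.length : Int) - 1).toNat)).map
        (fun (k : Nat) => (PySem.List.pyGetD cl (k : Int) [], PySem.List.pyGetD cl ((k : Int) + 1) []))
      = cl.zip cl.tail := by
  induction cl with
  | nil => simp
  | cons x tl ih =>
      cases tl with
      | nil => simp
      | cons y t =>
          have h1 : (((x :: y :: t).length : Int) - 1).toNat = (((y :: t).length : Int) - 1).toNat + 1 := by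
            simp
          rw [h1, List.range_succ_eq_map, List.map_cons, List.map_map,
              show (x :: y :: t).zip (x :: y :: t).tail = (x, y) :: (y :: t).zip (y :: t).tail from rfl]
          congr 1
          · rw [show ((0 : Nat) : Int) + 1 = ((1 : Nat) : Int) from by norm_num,
                PySem.List.pyGetD_natCast, PySem.List.pyGetD_natCast]
            rfl
          · rw [← ih]
            apply List.map_congr_left
            intro k _
            simp only [Function.comp]
            rw [show ((Nat.succ k : Nat) : Int) = ((k : Int) + 1) from by push_cast; ring,
                show ((k : Int) + 1) + 1 = ((k + 2 : Nat) : Int) from by push_cast; ring,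
                show ((k : Int) + 1) = ((k + 1 : Nat) : Int) from by push_cast; ring,
                PySem.List.pyGetD_natCast, PySem.List.pyGetD_natCast,
                PySem.List.pyGetD_natCast, PySem.List.pyGetD_natCast]
            simp

-- ===== VERDICT (by name: the statement is the Claim_ definition above) =====
theorem get_set_intersection_spec : Claim_equal_get_set_intersection := by
  intro cl _
  unfold Spec_get_set_intersection
  simp only [get_set_intersection, get_set_intersection_alt]
  rw [PySem.List.foldl_append_eq_flatMap, PySem.List.foldl_append_eq_flatMap]
  simp only [List.nil_append]
  have h := congrArg (List.flatMap (fun p : List Int × List Int =>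
      p.1.flatMap (fun x =>
        let s := PySem.List.sorted p.2 (fun x => x) false
        List.replicate (pvBisect s x true 0 s.length - pvBisect s x false 0 s.length) x)))
    (index_pairs cl)
  rw [← h, List.flatMap_map, PySem.List.pyRange_one]
  simp only [List.flatMap_map, zero_add, Int.sub_zero]
  apply List.flatMap_congr
  intro k _
  exact pair_eq _ _
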